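-- pv_equiv track=rewrite | github.com/mateuszkuczykkuczynski/BobTheCryptoBot | algorytm_test.py | decrease_alert
-- ===== SOURCE A (Python) =====
-- price_alerts = [5, 10, 15]
--
-- def decrease_alert(end_price):
--     notification = []
--     for price in reversed(price_alerts):
--         if end_price <= price:
--             notification.append(price)
--         else:
--             continue
--     return notification
-- ===== SOURCE B (Python) =====
-- price_alerts = [5, 10, 15]
--
-- def decrease_alert(end_price):
--     # binary-search the first index whose price >= end_price, then
--     # return the qualifying suffix reversed (list is sorted ascending)
--     lo, hi = 0, len(price_alerts)
--     while lo < hi: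
--         mid = (lo + hi) // 2
--         if price_alerts[mid] < end_price:
--             lo = mid + 1
--         else:
--             hi = mid
--     return price_alerts[lo:][::-1]
-- ===== Notes on version B (the rewrite author's own statement) =====
-- stated objective: idiomatic
-- what changed: Replaces the reverse scan-and-test of every element with a binary search for the first price >= end_price on the ascending constant list, followed by a slice and reversal of the qualifying suffix.
import Mathlib
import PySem

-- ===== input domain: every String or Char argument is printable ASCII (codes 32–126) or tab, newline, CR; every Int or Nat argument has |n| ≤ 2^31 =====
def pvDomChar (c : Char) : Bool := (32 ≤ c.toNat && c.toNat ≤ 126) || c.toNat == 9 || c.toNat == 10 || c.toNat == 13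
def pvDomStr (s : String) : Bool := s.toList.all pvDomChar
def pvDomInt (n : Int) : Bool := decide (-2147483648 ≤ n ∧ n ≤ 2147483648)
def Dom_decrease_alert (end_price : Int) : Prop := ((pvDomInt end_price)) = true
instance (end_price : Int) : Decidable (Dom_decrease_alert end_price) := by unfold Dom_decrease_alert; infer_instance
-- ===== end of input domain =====

-- B replaces A's reverse scan-and-test with a binary search for the first price >= end_price
-- followed by a slice-and-reverse of the suffix (objective: idiomatic; same return value).

-- ===== PORT A =====
def price_alerts : List Int := [5, 10, 15]

def decrease_alert (end_price : Int) : List Int :=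
  let notification : List Int := []
  let notification := price_alerts.reverse.foldl
    (fun acc price => if end_price ≤ price then acc ++ [price] else acc) notification
  notification

-- ===== PORT B =====
-- the while-loop of Source B; lo and hi stay ≥ 0 in Python, so Nat with Nat division is exact here
def pvBisectLoop (end_price : Int) (lo hi : Nat) : Nat :=
  if lo < hi then
    let mid := (lo + hi) / 2
    if (PySem.List.pyGet? price_alerts (Int.ofNat mid)).getD 0 < end_price then
      pvBisectLoop end_price (mid + 1) hi
    else
      pvBisectLoop end_price lo mid
  else lo
termination_by hi - lo
decreasing_by all_goals omega

def decrease_alert_alt (end_price : Int) : List Int :=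
  let lo := pvBisectLoop end_price 0 price_alerts.length
  (PySem.List.slice price_alerts (some (Int.ofNat lo)) none).reverse

-- ===== PRECONDITION & SPEC =====
def Spec_decrease_alert (end_price : Int) (out : List Int) : Prop := out = decrease_alert_alt end_price
instance (end_price : Int) (out : List Int) : Decidable (Spec_decrease_alert end_price out) := by unfold Spec_decrease_alert; infer_instance

-- ===== CLAIM (what is proved, stated in full; the proofs are below) =====
def Claim_equal_decrease_alert : Prop := ∀ (end_price : Int), Dom_decrease_alert end_price → Spec_decrease_alert end_price (decrease_alert end_price)

-- ===== LEMMAS AND PROOFS =====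
-- A's result, closed form: the four intervals cut by the three prices
lemma decrease_alert_closed (e : Int) :
    decrease_alert e =
      if e ≤ 5 then [15, 10, 5] else if e ≤ 10 then [15, 10] else if e ≤ 15 then [15] else [] := by
  simp only [decrease_alert, price_alerts, List.reverse_cons, List.reverse_nil,
    List.nil_append, List.cons_append, List.foldl_cons, List.foldl_nil]
  split_ifs <;> simp_all <;> omega

lemma bisect_step (e : Int) (lo hi : Nat) (h : lo < hi) :
    pvBisectLoop e lo hi =
      if (PySem.List.pyGet? price_alerts (Int.ofNat ((lo+hi)/2))).getD 0 < e then
        pvBisectLoop e ((lo+hi)/2 + 1) hi else pvBisectLoop e lo ((lo+hi)/2) := by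
  rw [pvBisectLoop]; simp [h]

lemma bisect_base (e : Int) (lo : Nat) : pvBisectLoop e lo lo = lo := by
  rw [pvBisectLoop]; simp

-- the binary search returns the first index whose price is ≥ e
lemma bisect_closed (e : Int) :
    pvBisectLoop e 0 3 = if e ≤ 5 then 0 else if e ≤ 10 then 1 else if e ≤ 15 then 2 else 3 := by
  have g1 : (PySem.List.pyGet? price_alerts (1:Int)).getD 0 = 10 := by decide
  have g0 : (PySem.List.pyGet? price_alerts (0:Int)).getD 0 = 5 := by decide
  have g2 : (PySem.List.pyGet? price_alerts (2:Int)).getD 0 = 15 := by decide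
  rw [bisect_step e 0 3 (by omega)]
  norm_num [g1]
  by_cases h10 : 10 < e
  · rw [if_pos h10, bisect_step e 2 3 (by omega)]
    norm_num [g2]
    by_cases h15 : 15 < e
    · rw [if_pos h15, bisect_base]; split_ifs <;> omega
    · rw [if_neg h15, bisect_base]; split_ifs <;> omega
  · rw [if_neg h10, bisect_step e 0 1 (by omega)]
    norm_num [g0]
    by_cases h5 : 5 < e
    · rw [if_pos h5, bisect_base]; split_ifs <;> omega
    · rw [if_neg h5, bisect_base]; split_ifs <;> omega

lemma decrease_alert_alt_closed (e : Int) :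
    decrease_alert_alt e =
      if e ≤ 5 then [15, 10, 5] else if e ≤ 10 then [15, 10] else if e ≤ 15 then [15] else [] := by
  simp only [decrease_alert_alt, price_alerts, List.length]
  rw [show (0:Nat) + 1 + 1 + 1 = 3 from rfl, bisect_closed]
  split_ifs <;> simp [PySem.List.slice]

-- ===== VERDICT (by name: the statement is the Claim_ definition above) =====
theorem decrease_alert_spec : Claim_equal_decrease_alert := by
  intro e _
  unfold Spec_decrease_alert
  rw [decrease_alert_closed, decrease_alert_alt_closed]
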